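-- pv_equiv track=rewrite | github.com/eschmidgall/ComputationalPhysics | Week3/enumerateRandomWalk.py | enumerateRandWalk
-- ===== SOURCE A (Python) =====
-- def enumerateRandWalk(x,N):
-- 	if N==1 and x==0:
-- 		return 0
-- 	if N==1 and x==-1:
-- 		return 1
-- 	if N==1 and x==1:
-- 		return 1
-- 	if abs(x)>N:
-- 		return 0
-- 	else:
-- 		return enumerateRandWalk(x-1,N-1)+enumerateRandWalk(x+1,N-1)
-- ===== SOURCE B (Python) =====
-- def enumerateRandWalk(x, N):
--     # closed form: number of N-step +-1 walks from 0 ending at x is C(N, (x+N)/2)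
--     if N < 1 or abs(x) > N or (x + N) % 2 != 0:
--         return 0
--     k = (x + N) // 2
--     c = 1
--     for i in range(1, k + 1):
--         c = c * (N - k + i) // i
--     return c
-- ===== Notes on version B (the rewrite author's own statement) =====
-- stated objective: alternative
-- what changed: A genuinely different algorithm: replaces the two-branch recursion with the closed-form binomial coefficient C(N,(x+N)/2), computed by one multiplicative loop of exact divisions.
-- outside the precondition, e.g. on enumerateRandWalk(9910, 9910): A returns 1, B returns 1
import Mathlib
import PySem

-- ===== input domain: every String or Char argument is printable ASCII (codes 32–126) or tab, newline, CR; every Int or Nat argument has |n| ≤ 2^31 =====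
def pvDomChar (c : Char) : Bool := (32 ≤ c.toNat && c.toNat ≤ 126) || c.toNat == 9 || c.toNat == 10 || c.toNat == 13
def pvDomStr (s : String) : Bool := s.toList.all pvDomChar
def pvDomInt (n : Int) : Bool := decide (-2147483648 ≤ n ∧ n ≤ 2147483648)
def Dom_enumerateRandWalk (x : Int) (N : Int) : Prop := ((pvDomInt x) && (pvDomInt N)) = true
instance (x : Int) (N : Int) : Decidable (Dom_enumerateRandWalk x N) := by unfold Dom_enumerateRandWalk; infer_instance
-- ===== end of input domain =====

-- B replaces A's two-branch recursion by the closed-form binomial C(N,(x+N)/2) computed in one loop (objective: alternative).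

-- ===== PORT A =====
def enumerateRandWalk (x : Int) (N : Int) : Int :=
  if N = 1 ∧ x = 0 then 0
  else if N = 1 ∧ x = -1 then 1
  else if N = 1 ∧ x = 1 then 1
  else if |x| > N then 0
  else enumerateRandWalk (x - 1) (N - 1) + enumerateRandWalk (x + 1) (N - 1)
termination_by (N + 1).toNat
decreasing_by
  · have h0 : (0:Int) ≤ N := le_trans (abs_nonneg x) (by omega)
    omega
  · have h0 : (0:Int) ≤ N := le_trans (abs_nonneg x) (by omega)
    omega

-- ===== PORT B =====
def enumerateRandWalk_alt (x : Int) (N : Int) : Int :=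
  -- Source B's local 'k = (x + N) // 2' is inlined
  if N < 1 ∨ |x| > N ∨ PySem.Int.mod (x + N) 2 ≠ 0 then 0
  else
    (PySem.List.pyRange 1 (PySem.Int.floordiv (x + N) 2 + 1) 1).foldl
      (fun c i => PySem.Int.floordiv (c * (N - PySem.Int.floordiv (x + N) 2 + i)) i) 1

-- ===== PRECONDITION & SPEC =====
-- Pre_ excludes the inputs with |x| ≤ N and N > 9900: there A's recursion reaches depth ≈ N and
-- hits CPython's recursion limit, raising RecursionError; the exact onset depends on the caller's
-- stack depth (observed between ≈9940 and 9999 under a limit of 10000), so whether A returns or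
-- raises just above the bound is an artefact of the call stack, and the whole band is excluded.
def Pre_enumerateRandWalk (x : Int) (N : Int) : Prop := |x| > N ∨ N ≤ 9900
instance (x : Int) (N : Int) : Decidable (Pre_enumerateRandWalk x N) := by unfold Pre_enumerateRandWalk; infer_instance
def pvWitness_enumerateRandWalk : Int × Int := (0, 4)

def Spec_enumerateRandWalk (x : Int) (N : Int) (out : Int) : Prop := out = enumerateRandWalk_alt x N
instance (x : Int) (N : Int) (out : Int) : Decidable (Spec_enumerateRandWalk x N out) := by unfold Spec_enumerateRandWalk; infer_instance

-- ===== CLAIM (what is proved, stated in full; the proofs are below) =====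
def Claim_equal_enumerateRandWalk : Prop := ∀ (x : Int) (N : Int), Dom_enumerateRandWalk x N → Pre_enumerateRandWalk x N → Spec_enumerateRandWalk x N (enumerateRandWalk x N)

-- ===== LEMMAS AND PROOFS =====

/-- Closed-form reference: number of n-step ±1 walks from 0 ending at x. -/
def walkF (n : Nat) (x : Int) : Int :=
  if 0 ≤ x + n ∧ x ≤ n ∧ (x + n) % 2 = 0 then
    ((n.choose ((x + n) / 2).toNat : Nat) : Int)
  else 0

/-- Pascal-style step for the closed form. -/
theorem walkF_step (n : Nat) (x : Int) :
    walkF (n + 1) x = walkF n (x - 1) + walkF n (x + 1) := by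
  unfold walkF
  push_cast
  by_cases hpar : (x + ((n : Int) + 1)) % 2 = 0
  · by_cases hlo : 0 ≤ x + ((n : Int) + 1)
    · by_cases hhi : x ≤ (n : Int) + 1
      · -- in range, even: x + n + 1 = 2k for a Nat k ≤ n+1
        obtain ⟨k, hk⟩ : ∃ k : Nat, x + ((n : Int) + 1) = 2 * k := by
          refine ⟨(x + ((n : Int) + 1)).toNat / 2, ?_⟩; omega
        have hkle : (k : Int) ≤ (n : Int) + 1 := by omega
        have hdiv1 : ((x + ((n : Int) + 1)) / 2).toNat = k := by omega
        rw [if_pos ⟨hlo, hhi, hpar⟩, hdiv1]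
        rcases Nat.eq_zero_or_pos k with hk0 | hkpos
        · -- k = 0 : left term vanishes
          subst hk0
          have hL : ¬ (0 ≤ x - 1 + (n : Int) ∧ x - 1 ≤ (n : Int) ∧ (x - 1 + n) % 2 = 0) := by omega
          have hR : 0 ≤ x + 1 + (n : Int) ∧ x + 1 ≤ (n : Int) ∧ (x + 1 + n) % 2 = 0 := by omega
          rw [if_neg hL, if_pos hR]
          have : ((x + 1 + (n : Int)) / 2).toNat = 0 := by omega
          simp [this]
        · rcases Nat.lt_or_ge k (n + 1) with hklt | hkeq
          · -- 1 ≤ k ≤ n : genuine Pascal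
            have hL : 0 ≤ x - 1 + (n : Int) ∧ x - 1 ≤ (n : Int) ∧ (x - 1 + n) % 2 = 0 := by omega
            have hR : 0 ≤ x + 1 + (n : Int) ∧ x + 1 ≤ (n : Int) ∧ (x + 1 + n) % 2 = 0 := by omega
            rw [if_pos hL, if_pos hR]
            have hdL : ((x - 1 + (n : Int)) / 2).toNat = k - 1 := by omega
            have hdR : ((x + 1 + (n : Int)) / 2).toNat = k := by omega
            rw [hdL, hdR]
            have hpas : (n + 1).choose k = n.choose (k - 1) + n.choose k := by
              have h := Nat.choose_succ_succ n (k - 1)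
              have hk1 : k - 1 + 1 = k := Nat.succ_pred_eq_of_pos hkpos
              simp only [Nat.succ_eq_add_one, hk1] at h
              exact h
            push_cast [hpas]; ring
          · -- k = n + 1 : right term vanishes
            have hkv : k = n + 1 := by omega
            subst hkv
            have hR : ¬ (0 ≤ x + 1 + (n : Int) ∧ x + 1 ≤ (n : Int) ∧ (x + 1 + n) % 2 = 0) := by omega
            have hL : 0 ≤ x - 1 + (n : Int) ∧ x - 1 ≤ (n : Int) ∧ (x - 1 + n) % 2 = 0 := by omega
            rw [if_pos hL, if_neg hR]
            have hdL : ((x - 1 + (n : Int)) / 2).toNat = n := by omega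
            rw [hdL]
            simp [Nat.choose_self]
      · -- x > n + 1 : all three conditions fail
        rw [if_neg (by omega), if_neg (by omega), if_neg (by omega)]; ring
    · rw [if_neg (by omega), if_neg (by omega), if_neg (by omega)]; ring
  · rw [if_neg (by omega), if_neg (by omega), if_neg (by omega)]; ring

theorem A_negone (y : Int) : enumerateRandWalk y (-1) = 0 := by
  have h0 : |y| > -1 := lt_of_lt_of_le (by norm_num) (abs_nonneg y)
  rw [enumerateRandWalk]
  rw [if_neg (by omega), if_neg (by omega), if_neg (by omega), if_pos h0]

theorem A_nonpos (x N : Int) (h : N ≤ 0) : enumerateRandWalk x N = 0 := by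
  rcases abs_cases x with ⟨h1, h2⟩ | ⟨h1, h2⟩ <;>
  · rw [enumerateRandWalk]
    by_cases hx : |x| > N
    · rw [if_neg (by omega), if_neg (by omega), if_neg (by omega), if_pos hx]
    · -- only possible when N = 0 and x = 0
      have hx0 : x = 0 := by omega
      have hN0 : N = 0 := by omega
      subst hx0; subst hN0
      rw [if_neg (by omega), if_neg (by omega), if_neg (by omega), if_neg hx]
      norm_num [A_negone]

theorem A_eq_walkF (n : Nat) : ∀ x : Int, enumerateRandWalk x ((n : Int) + 1) = walkF (n + 1) x := by
  induction n with
  | zero =>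
    intro x
    rcases abs_cases x with ⟨h1, h2⟩ | ⟨h1, h2⟩ <;>
    rw [enumerateRandWalk]
    all_goals
    unfold walkF
    norm_num
    by_cases h0 : x = 0
    · subst h0; norm_num
    · rw [if_neg (by omega)]
      by_cases hm : x = -1
      · subst hm; norm_num
      · rw [if_neg (by omega)]
        by_cases hp : x = 1
        · subst hp; norm_num
        · rw [if_neg (by omega)]
          have hgt : |x| > 1 := by omega
          rw [if_pos hgt, if_neg (by omega)]
  | succ n ih =>
    intro x
    rcases abs_cases x with ⟨h1, h2⟩ | ⟨h1, h2⟩ <;>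
    · rw [enumerateRandWalk]
      rw [if_neg (by push_cast; omega), if_neg (by push_cast; omega), if_neg (by push_cast; omega)]
      by_cases hx : |x| > ((n + 1 : Nat) : Int) + 1
      · rw [if_pos hx]
        unfold walkF
        rw [if_neg (by push_cast; omega)]
      · rw [if_neg hx]
        have e1 : (((n + 1 : Nat) : Int) + 1) - 1 = (n : Int) + 1 := by push_cast; ring
        rw [e1, ih (x - 1), ih (x + 1), ← walkF_step]

/-- B's multiplicative loop computes a binomial coefficient. -/
theorem loop_choose (m : Nat) : ∀ k : Nat,
    (PySem.List.pyRange 1 ((k : Int) + 1) 1).foldl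
      (fun c i => PySem.Int.floordiv (c * ((m : Int) + i)) i) 1
    = (((m + k).choose k : Nat) : Int) := by
  intro k
  induction k with
  | zero => simp [PySem.List.pyRange_one_eq_nil]
  | succ k ih =>
    have hsplit : PySem.List.pyRange 1 (((k : Int) + 1) + 1) 1
        = PySem.List.pyRange 1 ((k : Int) + 1) 1 ++ [(k : Int) + 1] := by
      exact PySem.List.pyRange_one_succ_right (by omega)
    push_cast
    rw [hsplit, List.foldl_append, ih]
    simp only [List.foldl_cons, List.foldl_nil]
    have hmul : ((m + k).choose k : Int) * ((m : Int) + ((k : Int) + 1))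
        = (((m + k + 1).choose (k + 1) * (k + 1) : Nat) : Int) := by
      have h := congrArg (Nat.cast (R := Int)) (Nat.add_one_mul_choose_eq (m + k) k)
      push_cast at h ⊢
      linear_combination h
    rw [hmul]
    have : ((k : Int) + 1) = (((k + 1 : Nat) : Int)) := by push_cast; ring
    rw [this, PySem.Int.floordiv_natCast]
    rw [Nat.mul_div_cancel _ (Nat.succ_pos k), Nat.add_assoc]

theorem B_eq_walkF (x N : Int) (hN : 1 ≤ N) : enumerateRandWalk_alt x N = walkF N.toNat x := by
  have habs := abs_choice x
  have habs0 : 0 ≤ |x| := abs_nonneg x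
  have hmod : PySem.Int.mod (x + N) 2 = (x + N) % 2 :=
    PySem.Int.mod_eq_emod_of_pos (by norm_num)
  have hfd : PySem.Int.floordiv (x + N) 2 = (x + N) / 2 :=
    PySem.Int.floordiv_eq_ediv_of_pos (by norm_num)
  have hcast : ((N.toNat : Int)) = N := by omega
  unfold enumerateRandWalk_alt walkF
  rw [hmod, hfd, hcast]
  split_ifs with hB hW hW'
  · exfalso
    obtain ⟨hw1, hw2, hw3⟩ := hW
    rcases hB with hb | hb | hb <;> rcases habs with h | h <;> omega
  · rfl
  · simp only [not_or, not_lt, ne_eq, not_not] at hB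
    obtain ⟨hb1, hxle, hpar⟩ := hB
    obtain ⟨kn, hkn⟩ : ∃ kn : Nat, (x + N) / 2 = (kn : Int) :=
      ⟨((x + N) / 2).toNat, by rcases habs with h | h <;> omega⟩
    obtain ⟨m, hm⟩ : ∃ m : Nat, N - (x + N) / 2 = (m : Int) :=
      ⟨(N - (x + N) / 2).toNat, by rcases habs with h | h <;> omega⟩
    have hmk : m + kn = N.toNat := by omega
    rw [hm, hkn, loop_choose m kn, hmk, Int.toNat_natCast]
  · exfalso
    simp only [not_or, not_lt, ne_eq, not_not] at hB
    obtain ⟨hb1, hxle, hpar⟩ := hB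
    exact hW' ⟨by rcases habs with h | h <;> omega, by rcases habs with h | h <;> omega, hpar⟩

-- ===== VERDICT (by name: the statement is the Claim_ definition above) =====
theorem enumerateRandWalk_spec : Claim_equal_enumerateRandWalk := by
  intro x N _ _
  unfold Spec_enumerateRandWalk
  by_cases hN : 1 ≤ N
  · obtain ⟨n, hn⟩ : ∃ n : Nat, N = (n : Int) + 1 := ⟨(N - 1).toNat, by omega⟩
    subst hn
    have ht : (((n : Int) + 1)).toNat = n + 1 := by omega
    rw [B_eq_walkF x _ hN, A_eq_walkF n x, ht]
  · rw [A_nonpos x N (by omega)]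
    unfold enumerateRandWalk_alt
    rw [if_pos (Or.inl (by omega))]
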